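-- pv_equiv track=rewrite | github.com/MHBinNauman/Encrypto | Encryption_Decryption_Modules.py | generalized_caesar_decrypt
-- ===== SOURCE A (Python) =====
-- def modular_inverse(a, m):
--     """Computes the Modular Inverse."""
--     m0, x0, x1 = m, 0, 1
--     while a > 1:
--         q = a // m
--         m, a = a % m, m
--         x0, x1 = x1 - q * x0, x0
--     return x1 + m0 if x1 < 0 else x1
--
-- def generalized_caesar_decrypt(ciphertext, a, b):
--     """Decrypts ciphertext using Generalized Caesar Cipher."""
--     decrypted_text = ""
--     a_inv = modular_inverse(a, 95)  # Modular inverse of a under modulo 95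
--     for char in ciphertext:
--         if 32 <= ord(char) <= 126:
--             y = ord(char) - 32
--             decrypted_char = chr(((a_inv * (y - b)) % 95) + 32)
--             decrypted_text += decrypted_char
--         else:
--             decrypted_text += char
--     return decrypted_text
-- ===== SOURCE B (Python) =====
-- def modular_inverse(a, m):
--     """Computes the Modular Inverse."""
--     m0, x0, x1 = m, 0, 1
--     while a > 1:
--         q = a // m
--         m, a = a % m, m
--         x0, x1 = x1 - q * x0, x0
--     return x1 + m0 if x1 < 0 else x1
--
-- def generalized_caesar_decrypt(ciphertext, a, b):
--     """Decrypts ciphertext using Generalized Caesar Cipher."""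
--     a_inv = modular_inverse(a, 95)
--     # Decryption is the affine map y -> a_inv*(y-b) mod 95, whose values over
--     # consecutive codes form an arithmetic progression with step a_inv mod 95.
--     # Build the whole decryption alphabet by additive stepping (no multiply
--     # per entry), then decrypt by indexing into it.
--     step = a_inv % 95
--     p = (-a_inv * b) % 95          # decryption of code 0
--     cells = []
--     for _ in range(95):
--         cells.append(chr(p + 32))
--         p = (p + step) % 95
--     alphabet = ''.join(cells)
--     return ''.join(alphabet[ord(c) - 32] if 32 <= ord(c) <= 126 else c
--                    for c in ciphertext)
-- ===== Notes on version B (the rewrite author's own statement) =====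
-- stated objective: alternative
-- what changed: Instead of applying the affine formula a_inv*(y-b) mod 95 to each character, B builds the 95-entry decryption alphabet once by additive stepping (the decryptions of consecutive codes form an arithmetic progression with step a_inv mod 95) and decrypts by indexing into that string in a single join pass.
import Mathlib
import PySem

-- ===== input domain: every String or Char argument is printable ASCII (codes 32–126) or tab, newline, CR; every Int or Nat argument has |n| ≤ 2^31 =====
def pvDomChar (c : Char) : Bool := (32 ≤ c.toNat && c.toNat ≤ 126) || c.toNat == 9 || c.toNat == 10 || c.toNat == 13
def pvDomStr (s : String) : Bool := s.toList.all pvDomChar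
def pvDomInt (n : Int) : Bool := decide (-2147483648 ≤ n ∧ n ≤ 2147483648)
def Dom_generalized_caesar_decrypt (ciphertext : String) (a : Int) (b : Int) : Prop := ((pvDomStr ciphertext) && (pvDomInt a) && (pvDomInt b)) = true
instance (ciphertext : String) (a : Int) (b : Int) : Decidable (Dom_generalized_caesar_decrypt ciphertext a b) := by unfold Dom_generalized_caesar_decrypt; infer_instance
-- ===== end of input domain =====

-- B replaces A's per-character affine computation by the 95-entry decryption alphabet
-- built once by additive stepping (an arithmetic progression mod 95), then a single
-- indexing pass (objective: alternative).

-- ===== PORT A =====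
-- while a > 1: q = a // m; m, a = a % m, m; x0, x1 = x1 - q * x0, x0
-- Recursion on m.toNat; from the call site m starts at 95 and stays nonnegative;
-- m = 0 with a > 1 is Python's ZeroDivisionError, excluded by Pre_ (the guard returns 0 there).
def miLoop (a m x0 x1 m0 : Int) : Int :=
  if 1 < a then
    if h : 0 < m then
      miLoop m (PySem.Int.mod a m) (x1 - (PySem.Int.floordiv a m) * x0) x0 m0
    else 0
  else if x1 < 0 then x1 + m0 else x1
termination_by m.toNat
decreasing_by
  have h1 : 0 ≤ PySem.Int.mod a m := PySem.Int.mod_nonneg a h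
  have h2 : PySem.Int.mod a m < m := PySem.Int.mod_lt a h
  omega

def modular_inverse (a m : Int) : Int := miLoop a m 0 1 m

def generalized_caesar_decrypt (ciphertext : String) (a : Int) (b : Int) : String :=
  let a_inv := modular_inverse a 95
  String.mk (ciphertext.toList.foldl
    (fun acc ch =>
      if 32 ≤ ch.toNat ∧ ch.toNat ≤ 126 then
        acc ++ [Char.ofNat ((PySem.Int.mod (a_inv * (((ch.toNat : Int) - 32) - b)) 95) + 32).toNat]
      else acc ++ [ch]) [])

-- ===== PORT B =====
-- the loop body 'cells.append(chr(p + 32)); p = (p + step) % 95' on the state (cells, p)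
def gcdAltBuild (step : Int) : List Int → List Char × Int → List Char × Int
  | [], s => s
  | _ :: t, s => gcdAltBuild step t (s.1 ++ [Char.ofNat (s.2 + 32).toNat], PySem.Int.mod (s.2 + step) 95)

def generalized_caesar_decrypt_alt (ciphertext : String) (a : Int) (b : Int) : String :=
  let a_inv := modular_inverse a 95
  let step := PySem.Int.mod a_inv 95
  let p0 := PySem.Int.mod (-a_inv * b) 95
  let alphabet := (gcdAltBuild step (PySem.List.pyRange 0 95 1) ([], p0)).1
  String.mk (ciphertext.toList.map (fun c =>
    if 32 ≤ c.toNat ∧ c.toNat ≤ 126 then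
      -- alphabet[ord(c) - 32]: the index is always in range (alphabet has 95 entries),
      -- so the IndexError arm (.getD fallback) is unreachable
      (PySem.List.pyGet? alphabet ((c.toNat : Int) - 32)).getD c
    else c))

-- ===== PRECONDITION & SPEC =====
-- Pre_ excludes exactly the inputs where Python A raises ZeroDivisionError inside
-- modular_inverse: a > 1 with gcd(a, 95) ≠ 1 (B raises there identically).
def Pre_generalized_caesar_decrypt (ciphertext : String) (a : Int) (b : Int) : Prop :=
  a ≤ 1 ∨ Int.gcd a 95 = 1
instance (ciphertext : String) (a : Int) (b : Int) : Decidable (Pre_generalized_caesar_decrypt ciphertext a b) := by unfold Pre_generalized_caesar_decrypt; infer_instance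

def pvWitness_generalized_caesar_decrypt : String × Int × Int := ("Khoor#Zruog!", 3, 7)

def Spec_generalized_caesar_decrypt (ciphertext : String) (a : Int) (b : Int) (out : String) : Prop := out = generalized_caesar_decrypt_alt ciphertext a b
instance (ciphertext : String) (a : Int) (b : Int) (out : String) : Decidable (Spec_generalized_caesar_decrypt ciphertext a b out) := by unfold Spec_generalized_caesar_decrypt; infer_instance

-- ===== CLAIM (what is proved, stated in full; the proofs are below) =====
def Claim_equal_generalized_caesar_decrypt : Prop := ∀ (ciphertext : String) (a : Int) (b : Int), Dom_generalized_caesar_decrypt ciphertext a b → Pre_generalized_caesar_decrypt ciphertext a b → Spec_generalized_caesar_decrypt ciphertext a b (generalized_caesar_decrypt ciphertext a b)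

-- ===== LEMMAS AND PROOFS =====

-- the value of p after i iterations of 'p = (p + step) % 95'
def gcdIter (step : Int) : Nat → Int → Int
  | 0, p => p
  | i + 1, p => gcdIter step i (PySem.Int.mod (p + step) 95)

-- B's build loop produces exactly the iterates of p, in order.
theorem gcdAltBuild_eq (step : Int) :
    ∀ (l : List Int) (acc : List Char) (p : Int),
      (gcdAltBuild step l (acc, p)).1
        = acc ++ (List.range l.length).map
            (fun i => Char.ofNat (gcdIter step i p + 32).toNat) := by
  intro l
  induction l with
  | nil => intro acc p; simp [gcdAltBuild]
  | cons x t ih =>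
      intro acc p
      simp only [gcdAltBuild, ih, List.length_cons, List.range_succ_eq_map,
        List.map_cons, List.map_map]
      simp [gcdIter, Function.comp_def]

-- closed form of the iterates when the start is already reduced mod 95
theorem gcdIter_closed (step : Int) :
    ∀ (i : Nat) (q : Int),
      gcdIter step i (PySem.Int.mod q 95) = PySem.Int.mod (q + i * step) 95 := by
  intro i
  induction i with
  | zero => intro q; simp [gcdIter]
  | succ i ih =>
      intro q
      show gcdIter step i (PySem.Int.mod (PySem.Int.mod q 95 + step) 95)
            = PySem.Int.mod (q + (i + 1 : Nat) * step) 95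
      rw [ih (PySem.Int.mod q 95 + step)]
      have h95 : (0:Int) < 95 := by norm_num
      simp only [PySem.Int.mod_eq_emod_of_pos h95]
      have hr : (q + ((i:Int) + 1) * step) = q + (step + (i:Int) * step) := by ring
      push_cast
      rw [hr, add_assoc (q % 95), Int.emod_add_emod]

-- A's loop ('append u ch in the if-branch, ch in the else') written as a single map.
theorem foldl_branch_eq_map (P : Char → Prop) [DecidablePred P] (u : Char → Char) :
    ∀ (l acc : List Char),
      l.foldl (fun acc ch => if P ch then acc ++ [u ch] else acc ++ [ch]) acc
        = acc ++ l.map (fun ch => if P ch then u ch else ch) := by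
  intro l
  induction l with
  | nil => intro acc; simp
  | cons ch t ih => intro acc; by_cases h : P ch <;> simp [h, ih]

theorem generalized_caesar_decrypt_spec : Claim_equal_generalized_caesar_decrypt := by
  intro ciphertext a b _ _
  simp only [Spec_generalized_caesar_decrypt, generalized_caesar_decrypt,
    generalized_caesar_decrypt_alt]
  rw [foldl_branch_eq_map]
  refine congrArg String.mk ?_
  rw [List.nil_append]
  apply List.map_congr_left
  intro ch _
  by_cases h : 32 ≤ ch.toNat ∧ ch.toNat ≤ 126
  · simp only [h]
    rw [gcdAltBuild_eq]
    rw [List.nil_append]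
    set a_inv := modular_inverse a 95 with ha
    set y : Nat := ch.toNat - 32 with hy
    have hidx : ((ch.toNat : Int) - 32) = (y : Int) := by omega
    have hy95 : y < 95 := by omega
    rw [hidx, PySem.List.pyGet?_natCast]
    have hlen : (PySem.List.pyRange 0 95 1).length = 95 := by
      simp [PySem.List.length_pyRange_one]
    rw [hlen]
    rw [List.getElem?_map, List.getElem?_range hy95]
    simp only [Option.map_some, Option.getD_some]
    rw [gcdIter_closed]
    have h95 : (0:Int) < 95 := by norm_num
    simp only [PySem.Int.mod_eq_emod_of_pos h95]
    have hmul : ((y:Int) * (a_inv % 95)) % 95 = ((y:Int) * a_inv) % 95 := by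
      conv_lhs => rw [Int.mul_emod]
      conv_rhs => rw [Int.mul_emod]
      rw [Int.emod_emod_of_dvd a_inv dvd_rfl]
    have harg : (-a_inv * b + (y:Int) * (a_inv % 95)) % 95
        = (a_inv * (((y:Int)) - b)) % 95 := by
      rw [Int.add_emod, hmul, ← Int.add_emod]
      congr 1
      ring
    rw [harg]
  · simp [h]

-- ===== VERDICT (by name: the statement is the Claim_ definition above) =====
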